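-- pv_equiv track=rewrite | github.com/FaLizar/Proyectos-Python | Guia/5.10.py | minuscula
-- ===== SOURCE A (Python) =====
-- def minuscula(t):
--     texto=""
--     aux=0
--     while aux<len(t):
--         if t[aux]>="A" and t[aux]<="Z":
--             texto+=chr(ord(t[aux])+32)
--         else:
--             texto+=t[aux]
--         aux+=1
--     return texto
-- ===== SOURCE B (Python) =====
-- def minuscula(t):
--     table = {c: c + 32 for c in range(ord('A'), ord('Z') + 1)}
--     return t.translate(table)
-- ===== Notes on version B (the rewrite author's own statement) =====
-- stated objective: idiomatic
-- what changed: B precomputes a dict translation table mapping each uppercase ASCII code point to its lowercase one and applies it in one str.translate pass, replacing A's explicit index loop with per-character range tests and quadratic string concatenation.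
import Mathlib
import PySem

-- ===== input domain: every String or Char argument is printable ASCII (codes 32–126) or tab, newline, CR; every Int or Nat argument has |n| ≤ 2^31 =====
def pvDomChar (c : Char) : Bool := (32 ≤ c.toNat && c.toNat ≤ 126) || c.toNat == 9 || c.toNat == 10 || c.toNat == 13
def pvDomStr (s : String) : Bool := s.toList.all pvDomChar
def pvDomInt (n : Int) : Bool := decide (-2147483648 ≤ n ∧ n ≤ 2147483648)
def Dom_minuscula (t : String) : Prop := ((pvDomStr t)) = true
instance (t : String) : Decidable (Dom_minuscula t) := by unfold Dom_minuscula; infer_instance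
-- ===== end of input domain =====

-- B replaces A's index loop (range test + string concatenation per character) by a precomputed
-- uppercase→lowercase translation table applied in one pass (str.translate); idiomatic, same result.


-- ===== PORT A =====
-- while loop over indices 0..len-1, accumulating texto by concatenation; ported as a fold
-- over the characters in order (t[aux] visits exactly the characters left to right).
def minuscula (t : String) : String :=
  String.ofList (t.toList.foldl
    (fun texto c =>
      if 'A' ≤ c ∧ c ≤ 'Z' then texto ++ [Char.ofNat (c.toNat + 32)]
      else texto ++ [c]) [])

-- ===== PORT B =====
-- table = {c: c + 32 for c in range(ord('A'), ord('Z') + 1)}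
def minTable : PySem.Dict Int Int :=
  (PySem.List.pyRange 65 91 1).foldl (fun d c => d.insert c (c + 32)) PySem.Dict.empty

-- t.translate(table): each char whose code point is a key is replaced by chr(value), others kept.
def minuscula_alt (t : String) : String :=
  String.ofList (t.toList.map (fun c =>
    match minTable.get? (c.toNat : Int) with
    | some v => Char.ofNat v.toNat
    | none => c))

-- ===== PRECONDITION & SPEC =====
def Spec_minuscula (t : String) (out : String) : Prop := out = minuscula_alt t
instance (t : String) (out : String) : Decidable (Spec_minuscula t out) := by unfold Spec_minuscula; infer_instance

-- ===== CLAIM (what is proved, stated in full; the proofs are below) =====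
def Claim_equal_minuscula : Prop := ∀ (t : String), Dom_minuscula t → Spec_minuscula t (minuscula t)

-- ===== LEMMAS AND PROOFS =====

theorem minTable_get (k : Int) :
    minTable.get? k = if 65 ≤ k ∧ k ≤ 90 then some (k + 32) else none := by
  have hT : minTable = PySem.Dict.mk
      [(65,97),(66,98),(67,99),(68,100),(69,101),(70,102),(71,103),(72,104),(73,105),
       (74,106),(75,107),(76,108),(77,109),(78,110),(79,111),(80,112),(81,113),(82,114),
       (83,115),(84,116),(85,117),(86,118),(87,119),(88,120),(89,121),(90,122)] := by decide
  rw [hT]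
  split_ifs with h
  · obtain ⟨h1, h2⟩ := h
    interval_cases k <;> decide
  · rw [PySem.Dict.get?_eq_none_iff_not_mem_keys]
    simp only [PySem.Dict.keys_mk]
    simp
    omega

theorem char_step (c : Char) :
    (match minTable.get? (c.toNat : Int) with
     | some v => Char.ofNat v.toNat
     | none => c) =
    if 'A' ≤ c ∧ c ≤ 'Z' then Char.ofNat (c.toNat + 32) else c := by
  rw [minTable_get]
  have key : ('A' ≤ c ∧ c ≤ 'Z') ↔ ((65 : Int) ≤ (c.toNat : Int) ∧ (c.toNat : Int) ≤ 90) := by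
    have h1 : ('A' ≤ c) ↔ (65 ≤ c.toNat) := Iff.rfl
    have h2 : (c ≤ 'Z') ↔ (c.toNat ≤ 90) := Iff.rfl
    rw [h1, h2]; omega
  by_cases h : (65 : Int) ≤ (c.toNat : Int) ∧ (c.toNat : Int) ≤ 90
  · rw [if_pos h, if_pos (key.mpr h)]
    show Char.ofNat ((c.toNat : Int) + 32).toNat = Char.ofNat (c.toNat + 32)
    have hv : ((c.toNat : Int) + 32).toNat = c.toNat + 32 := by omega
    rw [hv]
  · rw [if_neg h, if_neg (fun hc => h (key.mp hc))]

-- ===== VERDICT (by name: the statement is the Claim_ definition above) =====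
theorem minuscula_spec : Claim_equal_minuscula := by
  intro t _
  show minuscula t = minuscula_alt t
  unfold minuscula minuscula_alt
  congr 1
  have h : (fun (texto : List Char) c =>
      if 'A' ≤ c ∧ c ≤ 'Z' then texto ++ [Char.ofNat (c.toNat + 32)]
      else texto ++ [c]) = (fun texto c => texto ++
        [if 'A' ≤ c ∧ c ≤ 'Z' then Char.ofNat (c.toNat + 32) else c]) := by
    funext texto c; split_ifs <;> rfl
  rw [h, PySem.List.foldl_append_singleton_eq_map]
  simp only [List.nil_append]
  exact List.map_congr_left (fun c _ => (char_step c).symm)
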